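-- pv_equiv track=rewrite | github.com/pypi-data/pypi-mirror-382 | packages/split-datalawyer/split_datalawyer-0.1.100-py3-none-any.whl/split_datalawyer/utils/pdf_utils.py | replace_chars_in_interval
-- ===== SOURCE A (Python) =====
-- def replace_chars_in_interval(text, start, end, replacement):
--     result = []
--     for char in text:
--         char_code = ord(char)
--         if start <= char_code <= end:
--             result.append(replacement)
--         else:
--             result.append(char)
--     return ''.join(result)
-- ===== SOURCE B (Python) =====
-- def replace_chars_in_interval(text, start, end, replacement):
--     table = {ord(c): replacement for c in set(text) if start <= ord(c) <= end}
--     return text.translate(table)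
-- ===== Notes on version B (the rewrite author's own statement) =====
-- stated objective: idiomatic
-- what changed: Replaces the explicit ord/compare/append loop with a translation table built from the distinct in-interval characters of the text, consumed by one str.translate pass.
import Mathlib
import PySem

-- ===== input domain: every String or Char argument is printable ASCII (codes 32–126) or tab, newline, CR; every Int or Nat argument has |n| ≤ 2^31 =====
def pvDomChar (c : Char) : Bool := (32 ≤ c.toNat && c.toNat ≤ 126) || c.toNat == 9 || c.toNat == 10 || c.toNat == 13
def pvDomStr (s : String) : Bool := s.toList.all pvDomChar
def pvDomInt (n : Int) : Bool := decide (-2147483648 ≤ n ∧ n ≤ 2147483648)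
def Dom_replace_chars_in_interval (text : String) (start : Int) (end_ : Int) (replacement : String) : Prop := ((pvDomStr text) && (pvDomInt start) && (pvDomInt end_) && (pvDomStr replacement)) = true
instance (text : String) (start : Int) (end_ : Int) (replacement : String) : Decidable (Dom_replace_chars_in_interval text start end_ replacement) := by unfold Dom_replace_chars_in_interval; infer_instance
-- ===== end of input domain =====

-- B replaces A's ord/compare/append loop by a translation table built from the
-- distinct in-interval characters of the text, applied in one translate pass (idiomatic).


-- ===== PORT A =====
-- result = []; for char in text: append replacement or char; return ''.join(result)
def replace_chars_in_interval (text : String) (start : Int) (end_ : Int) (replacement : String) : String :=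
  let result : List String :=
    text.toList.foldl (fun acc char =>
      let char_code : Int := char.toNat
      if start ≤ char_code ∧ char_code ≤ end_ then acc ++ [replacement]
      else acc ++ [String.ofList [char]]) []
  PySem.Str.join "" result

-- ===== PORT B =====
-- table = {ord(c): replacement for c in set(text) if start <= ord(c) <= end}; text.translate(table)
-- (the dict is built over the set's elements and only looked up afterwards, so order is immaterial)
def replace_chars_in_interval_alt (text : String) (start : Int) (end_ : Int) (replacement : String) : String :=
  let table : PySem.Dict Int String :=
    (PySem.Set.ofList text.toList).foldl (fun d c =>
      if start ≤ (c.toNat : Int) ∧ (c.toNat : Int) ≤ end_ then d.insert (c.toNat : Int) replacement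
      else d) PySem.Dict.empty
  -- str.translate: each char is replaced by its table entry, kept if absent
  PySem.Str.join "" (text.toList.map (fun c => (table.get? (c.toNat : Int)).getD (String.ofList [c])))

-- ===== PRECONDITION & SPEC =====
def Spec_replace_chars_in_interval (text : String) (start : Int) (end_ : Int) (replacement : String) (out : String) : Prop := out = replace_chars_in_interval_alt text start end_ replacement
instance (text : String) (start : Int) (end_ : Int) (replacement : String) (out : String) : Decidable (Spec_replace_chars_in_interval text start end_ replacement out) := by unfold Spec_replace_chars_in_interval; infer_instance

-- ===== CLAIM (what is proved, stated in full; the proofs are below) =====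
def Claim_equal_replace_chars_in_interval : Prop := ∀ (text : String) (start : Int) (end_ : Int) (replacement : String), Dom_replace_chars_in_interval text start end_ replacement → Spec_replace_chars_in_interval text start end_ replacement (replace_chars_in_interval text start end_ replacement)

-- ===== LEMMAS AND PROOFS =====

-- A's append loop is a map.
theorem foldl_append_ite_eq_map (start end_ : Int) (replacement : String) (l : List Char) (acc : List String) :
    l.foldl (fun acc char =>
      let char_code : Int := char.toNat
      if start ≤ char_code ∧ char_code ≤ end_ then acc ++ [replacement]
      else acc ++ [String.ofList [char]]) acc
    = acc ++ l.map (fun c => if start ≤ (c.toNat : Int) ∧ (c.toNat : Int) ≤ end_ then replacement else String.ofList [c]) := by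
  induction l generalizing acc with
  | nil => simp
  | cons c t ih =>
    simp only [List.foldl_cons, List.map_cons]
    by_cases h : start ≤ (c.toNat : Int) ∧ (c.toNat : Int) ≤ end_ <;> simp [h, ih]

-- Lookup in the dict built by B's conditional-insert loop (all values equal).
theorem get?_foldl_cond_insert (start end_ : Int) (replacement : String) (l : List Char)
    (d : PySem.Dict Int String) (k : Int) :
    (l.foldl (fun d c =>
      if start ≤ (c.toNat : Int) ∧ (c.toNat : Int) ≤ end_ then d.insert (c.toNat : Int) replacement
      else d) d).get? k
    = if ∃ c ∈ l, (start ≤ (c.toNat : Int) ∧ (c.toNat : Int) ≤ end_) ∧ (c.toNat : Int) = k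
      then some replacement else d.get? k := by
  induction l generalizing d with
  | nil => rw [List.foldl_nil, if_neg (by rintro ⟨c, hc, -⟩; exact (List.not_mem_nil) hc)]
  | cons c t ih =>
    rw [List.foldl_cons, ih]
    by_cases hex : ∃ c' ∈ t, (start ≤ (c'.toNat : Int) ∧ (c'.toNat : Int) ≤ end_) ∧ (c'.toNat : Int) = k
    · rw [if_pos hex, if_pos (by obtain ⟨c', hc', h⟩ := hex; exact ⟨c', List.mem_cons_of_mem _ hc', h⟩)]
    · rw [if_neg hex]
      by_cases hP : start ≤ (c.toNat : Int) ∧ (c.toNat : Int) ≤ end_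
      · rw [if_pos hP]
        by_cases hk : (c.toNat : Int) = k
        · rw [← hk, PySem.Dict.get?_insert_self,
            if_pos (⟨c, List.mem_cons_self, hP, rfl⟩ :
              ∃ c' ∈ c :: t, (start ≤ (c'.toNat : Int) ∧ (c'.toNat : Int) ≤ end_) ∧ (c'.toNat : Int) = (c.toNat : Int))]
        · rw [PySem.Dict.get?_insert, if_neg (Ne.symm hk), if_neg]
          rintro ⟨c', hc', h1, h2⟩
          rcases List.mem_cons.mp hc' with rfl | hmem
          · exact hk h2
          · exact hex ⟨c', hmem, h1, h2⟩
      · rw [if_neg hP, if_neg]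
        rintro ⟨c', hc', h1, h2⟩
        rcases List.mem_cons.mp hc' with rfl | hmem
        · exact hP h1
        · exact hex ⟨c', hmem, h1, h2⟩

theorem charNat_inj {a b : Char} (h : (a.toNat : Int) = (b.toNat : Int)) : a = b := by
  have h2 : a.toNat = b.toNat := by exact_mod_cast h
  exact Char.ext (UInt32.toNat_inj.mp h2)

-- ===== VERDICT (by name: the statement is the Claim_ definition above) =====
theorem replace_chars_in_interval_spec : Claim_equal_replace_chars_in_interval := by
  intro text start end_ replacement _
  unfold Spec_replace_chars_in_interval replace_chars_in_interval replace_chars_in_interval_alt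
  simp only
  rw [foldl_append_ite_eq_map, List.nil_append]
  congr 1
  apply List.map_congr_left
  intro c hc
  rw [get?_foldl_cond_insert]
  by_cases hP : start ≤ (c.toNat : Int) ∧ (c.toNat : Int) ≤ end_
  · rw [if_pos (⟨c, (PySem.Set.mem_ofList _ _).mpr hc, hP, rfl⟩ :
      ∃ c' ∈ PySem.Set.ofList text.toList,
        (start ≤ (c'.toNat : Int) ∧ (c'.toNat : Int) ≤ end_) ∧ (c'.toNat : Int) = (c.toNat : Int)),
      if_pos hP, Option.getD_some]
  · rw [if_neg (by rintro ⟨c', -, h1, h2⟩; exact hP (charNat_inj h2 ▸ h1) :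
      ¬ ∃ c' ∈ PySem.Set.ofList text.toList,
        (start ≤ (c'.toNat : Int) ∧ (c'.toNat : Int) ≤ end_) ∧ (c'.toNat : Int) = (c.toNat : Int)),
      if_neg hP, PySem.Dict.get?_empty, Option.getD_none]
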